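-- pv_equiv track=rewrite | github.com/hjkim22/Python_Coding_Test | 프로그래머스/0/120834. 외계행성의 나이/외계행성의 나이.py | solution
-- ===== SOURCE A (Python) =====
-- def solution(age):
--     alphabet = "abcdefghij"
--
--     result = ""
--     while age > 0:
--         remainder = age % 10
--         result = alphabet[remainder] + result
--         age = age // 10
--
--     return result
-- ===== SOURCE B (Python) =====
-- TABLE = str.maketrans("0123456789", "abcdefghij")
--
--
-- def solution(age):
--     if age <= 0:
--         return ""
--     return str(age).translate(TABLE)
-- ===== Notes on version B (the rewrite author's own statement) =====
-- stated objective: idiomatic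
-- what changed: A extracts digits by repeated %10 and //10, prepending each letter into an accumulator string; B instead converts the number once to its decimal string and maps every character through a digit-to-letter translation table (str.translate), with the empty result for age <= 0 kept as an explicit guard.
import Mathlib
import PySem

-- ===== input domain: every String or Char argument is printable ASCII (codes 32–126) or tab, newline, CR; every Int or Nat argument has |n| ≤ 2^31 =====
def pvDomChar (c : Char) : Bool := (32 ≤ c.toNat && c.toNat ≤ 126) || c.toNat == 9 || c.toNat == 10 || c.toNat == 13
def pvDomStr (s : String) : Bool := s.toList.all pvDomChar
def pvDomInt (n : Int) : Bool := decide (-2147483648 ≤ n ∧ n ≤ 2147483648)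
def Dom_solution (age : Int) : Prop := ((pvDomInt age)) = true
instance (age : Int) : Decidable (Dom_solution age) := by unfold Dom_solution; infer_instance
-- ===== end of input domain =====

-- B replaces A's digit-extraction loop (%10, //10, prepend) by converting the number to its
-- decimal string once and translating each digit character to its letter (objective: idiomatic).
-- String concatenation is modeled on List Char (Lean's String.append is kernel-opaque).

-- floordiv by 10 shrinks a positive Int (termination of A's loop)
theorem pvDiv10_lt (age : Int) (h : 0 < age) :
    (PySem.Int.floordiv age 10).toNat < age.toNat := by
  rw [PySem.Int.floordiv_eq_ediv_of_pos (by omega)]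
  omega

-- ===== PORT A =====
-- the while loop: state (age, result); alphabet[remainder] is a 1-char string, its
-- prepend 'alphabet[remainder] + result' is the cons of that char
def solutionLoop (age : Int) (result : List Char) : List Char :=
  if h : 0 < age then
    solutionLoop (PySem.Int.floordiv age 10)
      (PySem.List.pyGetD "abcdefghij".toList (PySem.Int.mod age 10) ' ' :: result)
  else result
termination_by age.toNat
decreasing_by exact pvDiv10_lt age h

def solution (age : Int) : String :=
  String.ofList (solutionLoop age [])

-- ===== PORT B =====
-- TABLE = str.maketrans("0123456789", "abcdefghij"): a digit-char → letter-char mapping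
def pvTable : PySem.Dict Char Char :=
  ⟨List.zip "0123456789".toList "abcdefghij".toList⟩

-- str.translate: map every character through the table, unmapped characters unchanged
def pvTranslate (cs : List Char) : List Char :=
  cs.map (fun c => (PySem.Dict.get? pvTable c).getD c)

def solution_alt (age : Int) : String :=
  if age ≤ 0 then "" else String.ofList (pvTranslate (PySem.Int.toChars age))

-- ===== PRECONDITION & SPEC =====
def Spec_solution (age : Int) (out : String) : Prop := out = solution_alt age
instance (age : Int) (out : String) : Decidable (Spec_solution age out) := by unfold Spec_solution; infer_instance

-- ===== CLAIM (what is proved, stated in full; the proofs are below) =====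
def Claim_equal_solution : Prop := ∀ (age : Int), Dom_solution age → Spec_solution age (solution age)

-- ===== LEMMAS AND PROOFS =====

-- the decimal characters of a positive Nat, most significant first (reference form)
def pvChars (n : Nat) : List Char :=
  if h : 0 < n then pvChars (n / 10) ++ [Nat.digitChar (n % 10)]
  else []

-- toDigitsCore computes pvChars (for positive n with enough fuel)
theorem pvToDigitsCore_eq (f : Nat) : ∀ n acc, 0 < n → n < 10 ^ f →
    Nat.toDigitsCore 10 f n acc = pvChars n ++ acc := by
  induction f with
  | zero => intro n acc h1 h2; omega
  | succ f ih =>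
    intro n acc h1 h2
    rw [Nat.toDigitsCore, pvChars]
    simp only [h1, dif_pos]
    by_cases hq : n / 10 = 0
    · simp [hq, pvChars]
    · have hlt : n / 10 < 10 ^ f := by
        rw [Nat.div_lt_iff_lt_mul (by norm_num)]
        calc n < 10 ^ (f + 1) := h2
        _ = 10 ^ f * 10 := by ring
      simp only [hq]
      rw [ih (n / 10) _ (Nat.pos_of_ne_zero hq) hlt]
      simp

-- a digit's letter: A's alphabet lookup agrees with B's table applied to the digit char
theorem pvLetter_eq (d : Nat) (hd : d < 10) :
    PySem.List.pyGetD "abcdefghij".toList (d : Int) ' '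
      = (PySem.Dict.get? pvTable (Nat.digitChar d)).getD (Nat.digitChar d) := by
  interval_cases d <;> decide

-- A's loop computes the letter-mapped pvChars appended to the accumulator
theorem pvLoop_eq (n : Nat) : ∀ acc,
    solutionLoop (n : Int) acc
      = (pvChars n).map (fun c => (PySem.Dict.get? pvTable c).getD c) ++ acc := by
  induction n using Nat.strong_induction_on with
  | _ n ih =>
    intro acc
    rw [solutionLoop, pvChars]
    by_cases h : 0 < n
    · have h' : (0 : Int) < (n : Int) := by exact_mod_cast h
      have hfd : PySem.Int.floordiv (n : Int) 10 = ((n / 10 : Nat) : Int) := by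
        exact_mod_cast PySem.Int.floordiv_natCast n 10
      have hmd : PySem.Int.mod (n : Int) 10 = ((n % 10 : Nat) : Int) := by
        exact_mod_cast PySem.Int.mod_natCast n 10
      simp only [h, h', dif_pos]
      rw [hfd, hmd,
        pvLetter_eq (n % 10) (Nat.mod_lt n (by norm_num)),
        ih (n / 10) (Nat.div_lt_self h (by norm_num))]
      simp
    · have h' : ¬ (0 : Int) < (n : Int) := by exact_mod_cast h
      simp [h, h']

-- ===== VERDICT (by name: the statement is the Claim_ definition above) =====
theorem solution_spec : Claim_equal_solution := by
  intro age _
  unfold Spec_solution solution solution_alt pvTranslate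
  by_cases h : age ≤ 0
  · rw [solutionLoop]
    simp [h, not_lt.mpr h]
  · have hn : age = ((age.toNat : Nat) : Int) := by omega
    have hp : 0 < age.toNat := by omega
    rw [if_neg h, hn, pvLoop_eq, PySem.Int.toChars, if_neg (by omega), Int.toNat_natCast,
      Nat.toDigits, pvToDigitsCore_eq (age.toNat + 1) age.toNat [] hp
        (lt_of_lt_of_le (Nat.lt_pow_self (by norm_num)) (Nat.pow_le_pow_right (by norm_num) (by omega)))]
    simp
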